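-- pv_equiv track=rewrite | github.com/mschlaff/IntroComputing | HW3.py | nausea
-- ===== SOURCE A (Python) =====
-- def nausea(pattern, ate_lunch):
--
--     letterO = 0
--     if ate_lunch:
--         for letter in pattern:
--             if letter == "O":
--                 letterO += 1
--             elif letter != "O":
--                 letterO = 0
--             if letterO >= 3:
--                 return "I don't feel so good..."
--
--     if ate_lunch == False:
--         for letter in pattern:
--             if letter == "O":
--                 letterO += 1
--             elif letter != "O":
--                 letterO = 0
--             if letterO >= 3:
--                 return "I got this."
--
--     return "Let's do this!"
-- ===== SOURCE B (Python) =====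
-- def nausea(pattern, ate_lunch):
--     triple = "OOO" in pattern
--     if ate_lunch:
--         return "I don't feel so good..." if triple else "Let's do this!"
--     return "I got this." if triple else "Let's do this!"
-- ===== Notes on version B (the rewrite author's own statement) =====
-- stated objective: idiomatic
-- what changed: Replaces the two manual consecutive-counter scans with a single substring test ('OOO' in pattern) computed once, followed by a flat branch on ate_lunch.
import Mathlib
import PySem

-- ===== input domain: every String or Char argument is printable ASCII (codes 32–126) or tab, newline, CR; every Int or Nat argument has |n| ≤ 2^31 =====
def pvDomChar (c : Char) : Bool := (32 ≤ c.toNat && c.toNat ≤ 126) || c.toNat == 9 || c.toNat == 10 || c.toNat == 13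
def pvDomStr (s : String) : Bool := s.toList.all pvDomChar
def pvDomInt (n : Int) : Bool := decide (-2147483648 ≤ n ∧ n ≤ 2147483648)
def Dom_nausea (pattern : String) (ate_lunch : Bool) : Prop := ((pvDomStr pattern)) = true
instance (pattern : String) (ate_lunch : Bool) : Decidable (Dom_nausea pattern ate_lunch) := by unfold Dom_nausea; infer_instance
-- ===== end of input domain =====

-- B replaces A's two manual consecutive-counter scans with one substring test 'OOO' in pattern, computed once, then a flat branch.


-- ===== PORT A =====
-- A's for-loop with counter `letterO` and early return, as structural recursion returning whether the loop hit `letterO >= 3`.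
def nauseaScan (cs : List Char) (letterO : Int) : Bool :=
  match cs with
  | [] => false
  | c :: rest =>
    let letterO := if c == 'O' then letterO + 1 else 0
    if letterO ≥ 3 then true else nauseaScan rest letterO

def nausea (pattern : String) (ate_lunch : Bool) : String :=
  if ate_lunch then
    (if nauseaScan pattern.toList 0 then "I don't feel so good..."
     else "Let's do this!")  -- second loop is guarded by `ate_lunch == False`, which is false here
  else
    (if nauseaScan pattern.toList 0 then "I got this." else "Let's do this!")

-- ===== PORT B =====
def nausea_alt (pattern : String) (ate_lunch : Bool) : String :=
  let triple := PySem.Str.isIn "OOO" pattern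
  if ate_lunch then
    (if triple then "I don't feel so good..." else "Let's do this!")
  else
    (if triple then "I got this." else "Let's do this!")

-- ===== PRECONDITION & SPEC =====
def Spec_nausea (pattern : String) (ate_lunch : Bool) (out : String) : Prop := out = nausea_alt pattern ate_lunch
instance (pattern : String) (ate_lunch : Bool) (out : String) : Decidable (Spec_nausea pattern ate_lunch out) := by unfold Spec_nausea; infer_instance

-- ===== CLAIM (what is proved, stated in full; the proofs are below) =====
def Claim_equal_nausea : Prop := ∀ (pattern : String) (ate_lunch : Bool), Dom_nausea pattern ate_lunch → Spec_nausea pattern ate_lunch (nausea pattern ate_lunch)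

-- ===== LEMMAS AND PROOFS =====

-- what the counter `k` still needs to see to reach 3
def pvNeeded (k : Int) : List Char := if k ≤ 0 then ['O','O','O'] else if k = 1 then ['O','O'] else ['O']

theorem nauseaScan_iff (cs : List Char) (k : Int) (h0 : 0 ≤ k) (h3 : k < 3) :
    nauseaScan cs k = true ↔ (pvNeeded k <+: cs ∨ ['O','O','O'] <:+: cs) := by
  induction cs generalizing k with
  | nil =>
    simp only [nauseaScan, pvNeeded, List.infix_nil]
    constructor
    · intro h; exact absurd h (by simp)
    · rintro (h | h)
      · split_ifs at h <;> simp_all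
      · simp_all
  | cons c rest ih =>
    have hw : ∀ l rest', (['O','O'] : List Char) <+: rest' → l = (['O'] : List Char) → l <+: rest' :=
      fun l rest' h hl => hl ▸ (by decide : (['O'] : List Char) <+: ['O','O']).trans h
    by_cases hc : c = 'O'
    · subst hc
      have hk : k = 0 ∨ k = 1 ∨ k = 2 := by omega
      rcases hk with rfl | rfl | rfl
      · have hrec : nauseaScan ('O' :: rest) 0 = nauseaScan rest 1 := by simp [nauseaScan]
        rw [hrec, ih 1 (by norm_num) (by norm_num)]
        simp only [pvNeeded, List.infix_cons_iff, List.cons_prefix_cons]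
        norm_num
      · have hrec : nauseaScan ('O' :: rest) 1 = nauseaScan rest 2 := by simp [nauseaScan]
        rw [hrec, ih 2 (by norm_num) (by norm_num)]
        simp only [pvNeeded, List.infix_cons_iff, List.cons_prefix_cons]
        norm_num
        constructor
        · rintro (h | h)
          · exact Or.inl h
          · exact Or.inr (Or.inr h)
        · rintro (h | h | h)
          · exact Or.inl h
          · exact Or.inl (hw _ _ h rfl)
          · exact Or.inr h
      · have h2 : nauseaScan ('O' :: rest) 2 = true := by simp [nauseaScan]
        rw [h2]
        refine ⟨fun _ => Or.inl ?_, fun _ => rfl⟩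
        have : pvNeeded 2 = ['O'] := by norm_num [pvNeeded]
        rw [this]
        exact List.cons_prefix_cons.mpr ⟨rfl, List.nil_prefix⟩
    · have hrec : nauseaScan (c :: rest) k = nauseaScan rest 0 := by
        simp [nauseaScan, hc]
      rw [hrec, ih 0 (by norm_num) (by norm_num)]
      have hhd : ¬ pvNeeded k <+: (c :: rest) := by
        unfold pvNeeded
        split_ifs <;> rw [List.cons_prefix_cons] <;> rintro ⟨h, -⟩ <;> exact hc h.symm
      simp only [pvNeeded, List.infix_cons_iff] at *
      constructor
      · rintro (h | h)
        · right; right; exact h.isInfix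
        · right; right; exact h
      · rintro (h | h | h)
        · exact absurd h hhd
        · exact absurd h (by
            intro hp
            exact hc ((List.cons_prefix_cons.mp hp).1).symm)
        · exact Or.inr h

theorem nauseaScan_eq_isIn (pattern : String) :
    nauseaScan pattern.toList 0 = PySem.Str.isIn "OOO" pattern := by
  have h1 := nauseaScan_iff pattern.toList 0 (by norm_num) (by norm_num)
  have hN : pvNeeded 0 = ['O','O','O'] := by norm_num [pvNeeded]
  rw [hN] at h1
  have h2 : PySem.Str.isIn "OOO" pattern = true ↔ (['O','O','O'] : List Char) <:+: pattern.toList := by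
    rw [PySem.Str.isIn_eq]
    exact PySem.Chars.isIn_iff_infix _ _
  rw [Bool.eq_iff_iff]
  exact h1.trans ((or_iff_right_of_imp List.IsPrefix.isInfix).trans h2.symm)

-- ===== VERDICT (by name: the statement is the Claim_ definition above) =====
theorem nausea_spec : Claim_equal_nausea := by
  intro pattern ate_lunch _
  unfold Spec_nausea nausea nausea_alt
  rw [nauseaScan_eq_isIn]
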